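-- pv_equiv track=rewrite | github.com/SunsettiaSama/Algorithm_Learning | A3-真题/拼多多/0329/1-多多驾驶员.py | max_safe_consecutive_points
-- ===== SOURCE A (Python) =====
-- def max_safe_consecutive_points(initial_weight, max_safe_weight, weights):
--     # cur 表示当前途经点处理后的实际载重
--     cur = initial_weight
--     # cnt 表示当前连续安全途经点数量
--     cnt = 0
--     # ans 表示最大连续安全途经点数量
--     ans = 0
--
--     for change in weights:
--         # 到达当前途经点后，更新载重
--         cur = max(0,cur+change)
--
--         # 如果当前载重不超过安全上限，则当前点安全
--         if cur <= max_safe_weight: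
--             cnt += 1
--             ans = max(ans, cnt)
--         else:
--             # 当前点不安全，连续计数中断
--             cnt = 0
--
--     # 如果没有任何安全途经点，返回 -1
--     return -1 if ans == 0 else ans
-- ===== SOURCE B (Python) =====
-- def max_safe_consecutive_points(initial_weight, max_safe_weight, weights):
--     # Pass 1: sequential load simulation -> per-point safety flags.
--     flags = []
--     cur = initial_weight
--     for change in weights:
--         cur = max(0, cur + change)
--         flags.append(cur <= max_safe_weight)
--     # Pass 2: group-by-value scan over flags; longest True group wins.
--     best = 0
--     i = 0
--     n = len(flags)
--     while i < n:
--         b = flags[i]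
--         j = i + 1
--         while j < n and flags[j] == b:
--             j += 1
--         if b:
--             best = max(best, j - i)
--         i = j
--     return -1 if best == 0 else best
-- ===== Notes on version B (the rewrite author's own statement) =====
-- stated objective: alternative
-- what changed: A's single fused loop (running load, streak counter, running max) is split into a flag-producing simulation pass followed by a separate group-by scan that takes the longest run of True flags.
import Mathlib
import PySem

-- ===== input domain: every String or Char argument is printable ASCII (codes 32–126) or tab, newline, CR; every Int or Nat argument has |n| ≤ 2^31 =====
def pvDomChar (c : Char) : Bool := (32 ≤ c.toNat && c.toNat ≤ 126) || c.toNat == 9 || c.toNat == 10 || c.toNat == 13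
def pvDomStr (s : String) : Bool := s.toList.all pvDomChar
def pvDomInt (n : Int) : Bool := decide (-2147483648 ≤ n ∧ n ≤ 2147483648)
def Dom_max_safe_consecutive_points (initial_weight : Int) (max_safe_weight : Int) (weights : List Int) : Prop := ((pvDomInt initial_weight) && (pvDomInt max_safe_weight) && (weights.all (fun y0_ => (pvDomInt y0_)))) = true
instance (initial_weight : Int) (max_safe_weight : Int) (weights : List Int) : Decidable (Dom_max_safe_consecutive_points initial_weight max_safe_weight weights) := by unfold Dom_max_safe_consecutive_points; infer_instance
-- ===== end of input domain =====

-- B replaces A's single fused loop (running load + streak counter + running max) by two passes: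
-- a simulation pass producing per-point safety flags, then a group-by scan over the flags
-- taking the longest True group; objective: alternative decomposition (not faster).

-- ===== PORT A =====
-- one iteration of A's loop over weights, state (cur, cnt, ans)
def pvStepA (max_safe_weight : Int) (s : Int × Int × Int) (change : Int) : Int × Int × Int :=
  let cur := max 0 (s.1 + change)
  if cur ≤ max_safe_weight then (cur, s.2.1 + 1, max s.2.2 (s.2.1 + 1))
  else (cur, 0, s.2.2)

def max_safe_consecutive_points (initial_weight : Int) (max_safe_weight : Int) (weights : List Int) : Int :=
  let s := weights.foldl (pvStepA max_safe_weight) (initial_weight, 0, 0)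
  if s.2.2 = 0 then -1 else s.2.2

-- ===== PORT B =====
-- pass 1: load simulation, emitting the safety flag of each point
def pvFlags (max_safe_weight : Int) (cur : Int) : List Int → List Bool
  | [] => []
  | change :: t =>
      let cur' := max 0 (cur + change)
      decide (cur' ≤ max_safe_weight) :: pvFlags max_safe_weight cur' t

-- pass 2: group-by scan (peel one maximal equal-valued group per step); longest True group
def pvLongestTrueRun : List Bool → Int
  | [] => 0
  | b :: t =>
      let g := t.takeWhile (fun x => x == b)
      let rest := t.dropWhile (fun x => x == b)
      if b then max ((g.length : Int) + 1) (pvLongestTrueRun rest)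
      else pvLongestTrueRun rest
termination_by l => l.length
decreasing_by
  all_goals exact Nat.lt_succ_of_le (List.length_dropWhile_le _ _)

def max_safe_consecutive_points_alt (initial_weight : Int) (max_safe_weight : Int) (weights : List Int) : Int :=
  let best := pvLongestTrueRun (pvFlags max_safe_weight initial_weight weights)
  if best = 0 then -1 else best

-- ===== PRECONDITION & SPEC =====
def Spec_max_safe_consecutive_points (initial_weight : Int) (max_safe_weight : Int) (weights : List Int) (out : Int) : Prop := out = max_safe_consecutive_points_alt initial_weight max_safe_weight weights
instance (initial_weight : Int) (max_safe_weight : Int) (weights : List Int) (out : Int) : Decidable (Spec_max_safe_consecutive_points initial_weight max_safe_weight weights out) := by unfold Spec_max_safe_consecutive_points; infer_instance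

-- ===== CLAIM (what is proved, stated in full; the proofs are below) =====
def Claim_equal_max_safe_consecutive_points : Prop := ∀ (initial_weight : Int) (max_safe_weight : Int) (weights : List Int), Dom_max_safe_consecutive_points initial_weight max_safe_weight weights → Spec_max_safe_consecutive_points initial_weight max_safe_weight weights (max_safe_consecutive_points initial_weight max_safe_weight weights)

-- ===== LEMMAS AND PROOFS =====

-- A's (cnt, ans) updates, replayed over the flag list
def pvF : List Bool → Int → Int → Int × Int
  | [], cnt, ans => (cnt, ans)
  | b :: t, cnt, ans => if b then pvF t (cnt + 1) (max ans (cnt + 1)) else pvF t 0 ans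

-- best streak achievable in fs given a current open streak of length cnt
def pvBest : List Bool → Int → Int
  | [], _ => 0
  | b :: t, cnt => if b then max (cnt + 1) (pvBest t (cnt + 1)) else pvBest t 0

theorem pvF_flags (msw : Int) :
    ∀ (ws : List Int) (cur cnt ans : Int),
      (ws.foldl (pvStepA msw) (cur, cnt, ans)).2 = pvF (pvFlags msw cur ws) cnt ans := by
  intro ws
  induction ws with
  | nil => intro cur cnt ans; simp [pvFlags, pvF]
  | cons c t ih =>
      intro cur cnt ans
      simp only [List.foldl_cons, pvFlags, pvStepA]
      by_cases h : max 0 (cur + c) ≤ msw <;> simp [h, pvF, ih]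

theorem pvBest_nonneg : ∀ (fs : List Bool) (cnt : Int), 0 ≤ pvBest fs cnt := by
  intro fs
  induction fs with
  | nil => intro cnt; simp [pvBest]
  | cons b t ih =>
      intro cnt
      cases b <;> simp [pvBest] <;> [exact ih 0; exact Or.inr (ih (cnt + 1))]

theorem pvF_eq_best : ∀ (fs : List Bool) (cnt ans : Int), 0 ≤ ans →
    (pvF fs cnt ans).2 = max ans (pvBest fs cnt) := by
  intro fs
  induction fs with
  | nil => intro cnt ans h; simp [pvF, pvBest]; omega
  | cons b t ih =>
      intro cnt ans h
      cases b
      · simpa [pvF, pvBest] using ih 0 ans h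
      · simp only [pvF, pvBest, if_pos]
        rw [ih (cnt + 1) (max ans (cnt + 1)) (by omega)]
        have := pvBest_nonneg t (cnt + 1)
        simp

theorem pvBest_true (t : List Bool) : ∀ (cnt : Int),
    pvBest (true :: t) cnt
      = max (((t.takeWhile (fun x => x == true)).length : Int) + 1 + cnt)
            (pvBest (t.dropWhile (fun x => x == true)) 0) := by
  induction t with
  | nil => intro cnt; simp [pvBest]; omega
  | cons b t' ih =>
      intro cnt
      cases b
      · simp [pvBest, List.takeWhile, List.dropWhile]
        omega
      · have h := ih (cnt + 1)
        simp [pvBest, List.takeWhile, List.dropWhile] at h ⊢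
        rw [h]
        have := pvBest_nonneg (t'.dropWhile (fun x => x == true)) 0
        omega

theorem pvBest_dropFalse : ∀ (t : List Bool),
    pvBest (t.dropWhile (fun x => x == false)) 0 = pvBest t 0 := by
  intro t
  induction t with
  | nil => rfl
  | cons b t' ih =>
      cases b
      · simpa [List.dropWhile, pvBest] using ih
      · simp [List.dropWhile]

theorem pvLTR_cons (b : Bool) (t : List Bool) :
    pvLongestTrueRun (b :: t)
      = if b then max (((t.takeWhile (fun x => x == b)).length : Int) + 1)
                     (pvLongestTrueRun (t.dropWhile (fun x => x == b)))
        else pvLongestTrueRun (t.dropWhile (fun x => x == b)) := by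
  rw [pvLongestTrueRun]

theorem pvLTR_eq_best : ∀ (n : Nat) (fs : List Bool), fs.length ≤ n →
    pvLongestTrueRun fs = pvBest fs 0 := by
  intro n
  induction n with
  | zero =>
      intro fs h
      have : fs = [] := List.eq_nil_of_length_eq_zero (Nat.le_zero.mp h)
      subst this; simp [pvLongestTrueRun, pvBest]
  | succ n ih =>
      intro fs h
      cases fs with
      | nil => simp [pvLongestTrueRun, pvBest]
      | cons b t =>
          have hrest : (t.dropWhile (fun x => x == b)).length ≤ n := by
            have := List.length_dropWhile_le (fun x => x == b) t
            simp at h; omega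
          cases b
          · rw [pvLTR_cons]
            simp only [Bool.false_eq_true, if_false]
            rw [ih _ hrest, pvBest_dropFalse]
            simp [pvBest]
          · rw [pvLTR_cons]
            simp only [if_pos]
            rw [ih _ hrest, pvBest_true]
            simp

-- ===== VERDICT (by name: the statement is the Claim_ definition above) =====
theorem max_safe_consecutive_points_spec : Claim_equal_max_safe_consecutive_points := by
  intro iw msw ws _
  unfold Spec_max_safe_consecutive_points max_safe_consecutive_points max_safe_consecutive_points_alt
  have h1 := pvF_flags msw ws iw 0 0
  have h2 := pvF_eq_best (pvFlags msw iw ws) 0 0 le_rfl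
  have h3 := pvLTR_eq_best (pvFlags msw iw ws).length (pvFlags msw iw ws) le_rfl
  have h4 := pvBest_nonneg (pvFlags msw iw ws) 0
  simp only [] at *
  rw [h1, h2, h3]
  have : max (0 : Int) (pvBest (pvFlags msw iw ws) 0) = pvBest (pvFlags msw iw ws) 0 := by omega
  rw [this]
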